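-- pv_equiv track=rewrite | github.com/tommyskeff/bio-practice | 2019/q3-2019.py | generate_layer
-- ===== SOURCE A (Python) =====
-- def generate_layer(layer_size: int) -> list[int]:
--     """
--     Recursively calculates the number of combinations for each prefix consisting of a
--     single letter (by following the observed addition sequence pattern) for all valid
--     (block)chains of the given length (layer).
--
--     The core patterns operate as follows (just trust this, cannot fully explain):
--
--     The number of combinations beginning with the first letter will always be 1;
--
--     The number of combinations beginning with either of the last 2 letters will always
--     be the same;
--
--     The number of combinations always ascends between each consecutive single letter
--     prefix in any layer;
--
--     The differences between the number of combinations for each single letter prefix in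
--     any layer ARE the number of combinations for each single letter prefix for the
--     previous layer (in the same order);
--
--     And for multi-letter prefixes, assuming they have at least one valid chain, the
--     number of valid chains is simply the number of valid chains for the final letter
--     of the prefix in the layer with the chain length as if you were ignoring the rest of
--     the prefix (e.g. for "5 EBA", we look at the number of valid chains beginning with
--     "A" in the layer with chain length 3, as there are 2 other letters in the prefix,
--     which results in the correct answer of 1 valid chain (following the first pattern)).
--
--     The penultimate pattern is the most crucial. It means we can mathematically
--     calculate the number of combinations for any layer by applying the idea in reverse
--     (starting with the chains of length 1, or the smallest layer). This way, we avoid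
--     ever actually generating any chains to find the number of valid combinations.
--
--     Other interesting patterns can be observed which may help to explain the above or
--     improve this solution in future, such as how when adding a new later letter to any
--     layer, the resulting chains will always be valid when placing it in the 1st and 2nd
--     place of all the original valid chains, but are irrelevant to this solution for the
--     time being.
--     """
--
--     if layer_size <= 1:
--         # base recursion case
--         return [1]
--
--     prev_layer = generate_layer(layer_size - 1)
--     layer, total = [], 0
--
--     for i in range(layer_size):
--         if len(prev_layer) > i:
--             # whilst the letters of the previous layer are present in this layer, we
--             # can increment the running total with their number of combinations in
--             # accordance with the penultimate pattern
--             total += prev_layer[i]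
--         # this way, the final total will appear in the layer twice at the end, in
--         # accordance with the 2nd pattern
--         layer.append(total)
--
--     return layer
-- ===== SOURCE B (Python) =====
-- def generate_layer(layer_size: int) -> list[int]:
--     # Closed form: row n-1 of Catalan's triangle via an O(1) multiplicative recurrence.
--     if layer_size <= 1:
--         return [1]
--     n = layer_size - 1
--     row = [1]
--     t = 1
--     for k in range(1, n + 1):
--         t = t * (n + k) * (n + 1 - k) // (k * (n + 2 - k))
--         row.append(t)
--     return row
-- ===== Notes on version B (the rewrite author's own statement) =====
-- stated objective: faster
-- what changed: Replaced the recursive layer-by-layer prefix-sum construction (rebuilding every previous layer) with a direct closed-form computation of the single requested row of Catalan's triangle via an O(1) multiplicative recurrence per entry.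
import Mathlib
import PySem

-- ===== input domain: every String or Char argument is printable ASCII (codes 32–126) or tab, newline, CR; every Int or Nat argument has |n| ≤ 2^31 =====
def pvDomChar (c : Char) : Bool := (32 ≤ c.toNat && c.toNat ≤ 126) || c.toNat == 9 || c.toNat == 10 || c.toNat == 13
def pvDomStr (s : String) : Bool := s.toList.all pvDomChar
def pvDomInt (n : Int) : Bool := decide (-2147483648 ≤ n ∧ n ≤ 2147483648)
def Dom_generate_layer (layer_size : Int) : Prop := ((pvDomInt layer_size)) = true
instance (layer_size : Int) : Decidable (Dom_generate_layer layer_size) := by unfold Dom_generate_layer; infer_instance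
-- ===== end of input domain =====

-- B replaces A's recursive prefix-sum construction of every previous layer with a
-- direct closed-form computation of the requested row (Catalan's triangle) using an
-- O(1) multiplicative step per entry; objective: faster (asymptotic, O(n) vs O(n^2)).

-- ===== PORT A =====
-- loop body of A's 'for i in range(layer_size)'; the pyGetD default is never used:
-- Python reads prev_layer[i] only under the guard len(prev_layer) > i with i ≥ 0.
def aStep (prev : List Int) (st : List Int × Int) (i : Int) : List Int × Int :=
  let total := if PySem.List.len prev > i then st.2 + PySem.List.pyGetD prev i 0 else st.2
  (st.1 ++ [total], total)

def generate_layer (layer_size : Int) : List Int :=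
  if layer_size ≤ 1 then [1]
  else
    let prev_layer := generate_layer (layer_size - 1)
    ((PySem.List.pyRange 0 layer_size 1).foldl (aStep prev_layer) ([], 0)).1
termination_by layer_size.toNat
decreasing_by omega

-- ===== PORT B =====
-- loop body of B's 'for k in range(1, n + 1)'
def bStep (n : Int) (st : List Int × Int) (k : Int) : List Int × Int :=
  let t := PySem.Int.floordiv (st.2 * (n + k) * (n + 1 - k)) (k * (n + 2 - k))
  (st.1 ++ [t], t)

def generate_layer_alt (layer_size : Int) : List Int :=
  if layer_size ≤ 1 then [1]
  else
    let n := layer_size - 1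
    ((PySem.List.pyRange 1 (n + 1) 1).foldl (bStep n) ([1], 1)).1

-- ===== PRECONDITION & SPEC =====
-- A's recursion depth grows linearly with layer_size, so once layer_size reaches the
-- interpreter's recursion limit A raises RecursionError; Pre_ stays a small safety
-- margin below that limit, so it may also exclude a few large inputs on which A
-- still returns.
def Pre_generate_layer (layer_size : Int) : Prop := layer_size < 9900
instance (layer_size : Int) : Decidable (Pre_generate_layer layer_size) := by unfold Pre_generate_layer; infer_instance
def pvWitness_generate_layer : Int := (5)

def Spec_generate_layer (layer_size : Int) (out : List Int) : Prop := out = generate_layer_alt layer_size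
instance (layer_size : Int) (out : List Int) : Decidable (Spec_generate_layer layer_size out) := by unfold Spec_generate_layer; infer_instance

-- ===== CLAIM (what is proved, stated in full; the proofs are below) =====
def Claim_equal_generate_layer : Prop := ∀ (layer_size : Int), Dom_generate_layer layer_size → Pre_generate_layer layer_size → Spec_generate_layer layer_size (generate_layer layer_size)

-- ===== LEMMAS AND PROOFS =====

-- entry k of row n of Catalan's triangle (as an integer):
-- catT n k = C(n+k, k) - C(n+k, k-1), with catT n 0 = 1
def catT (n k : Nat) : Int :=
  match k with
  | 0 => 1
  | j + 1 => ((n + j + 1).choose (j + 1) : Int) - ((n + j + 1).choose j : Int)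

-- Pascal's rule, cast to Int
theorem pascalZ (m k : Nat) : (((m + 1).choose (k + 1) : Int)) = (m.choose k : Int) + (m.choose (k + 1) : Int) := by
  rw [Nat.choose_succ_succ]; push_cast; ring

-- choose(n+k+1, k+1) * (k+1) = choose(n+k+1, k) * (n+1)
theorem chooseStep (n k : Nat) : ((n + k + 1).choose (k + 1) : Int) * ((k : Int) + 1) = ((n + k + 1).choose k : Int) * ((n : Int) + 1) := by
  have h := Nat.choose_succ_right_eq (n + k + 1) k
  have h2 : n + k + 1 - k = n + 1 := by omega
  rw [h2] at h
  exact_mod_cast h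

theorem starC (n k : Nat) : catT n (k + 1) * ((k : Int) + 1) = ((n + k + 1).choose k : Int) * ((n : Int) - (k : Int)) := by
  show (((n + k + 1).choose (k + 1) : Int) - ((n + k + 1).choose k : Int)) * ((k : Int) + 1) = _
  linear_combination chooseStep n k

theorem starC2 (n k : Nat) : catT n (k + 1) * ((n : Int) + (k : Int) + 2) = ((n + k + 2).choose (k + 1) : Int) * ((n : Int) - (k : Int)) := by
  show (((n + k + 1).choose (k + 1) : Int) - ((n + k + 1).choose k : Int)) * ((n : Int) + (k : Int) + 2) = _
  have hp : ((n + k + 2).choose (k + 1) : Int) = ((n + k + 1).choose k : Int) + ((n + k + 1).choose (k + 1) : Int) := pascalZ (n + k + 1) k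
  linear_combination 2 * chooseStep n k + ((n : Int) - (k : Int)) * hp.symm

-- the multiplicative recurrence between consecutive entries of a row
theorem keyK (n k : Nat) : catT n (k + 1) * (((k : Int) + 1) * ((n : Int) + 1 - (k : Int))) = catT n k * (((n : Int) + (k : Int) + 1) * ((n : Int) - (k : Int))) := by
  cases k with
  | zero => simp [catT, Nat.choose_one_right]; ring
  | succ j =>
    have h1 := starC n (j + 1)
    have h2 := starC2 n j
    push_cast at h1 h2 ⊢
    have e1 : n + (j + 1) + 1 = n + j + 2 := by omega
    rw [e1] at h1
    linear_combination ((n : Int) - (j : Int)) * h1 - ((n : Int) - (j : Int) - 1) * h2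

-- Pascal's rule for the triangle
theorem pascalC (n k : Nat) : catT (n + 1) (k + 1) = catT (n + 1) k + catT n (k + 1) := by
  cases k with
  | zero => simp [catT, Nat.choose_one_right]; omega
  | succ j =>
    show (((n + 1 + (j + 1) + 1).choose (j + 2) : Int) - ((n + 1 + (j + 1) + 1).choose (j + 1) : Int))
        = (((n + 1 + j + 1).choose (j + 1) : Int) - ((n + 1 + j + 1).choose j : Int))
        + (((n + (j + 1) + 1).choose (j + 2) : Int) - ((n + (j + 1) + 1).choose (j + 1) : Int))
    have e1 : n + 1 + (j + 1) + 1 = (n + j + 2) + 1 := by omega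
    have e2 : n + 1 + j + 1 = n + j + 2 := by omega
    have e3 : n + (j + 1) + 1 = n + j + 2 := by omega
    rw [e1, e2, e3]
    linear_combination pascalZ (n + j + 2) (j + 1) - pascalZ (n + j + 2) j

-- prefix sums of a row give the next row
theorem Ssum (n k : Nat) : (∑ i ∈ Finset.range (k + 1), catT n i) = catT (n + 1) k := by
  induction k with
  | zero => simp [catT]
  | succ j ih => rw [Finset.sum_range_succ, ih, pascalC]

-- the last two entries of a row agree
theorem topT (n : Nat) : catT (n + 1) (n + 1) = catT (n + 1) n := by
  cases n with
  | zero => decide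
  | succ m =>
    show (((m + 2) + (m + 1) + 1).choose (m + 2) : Int) - (((m + 2) + (m + 1) + 1).choose (m + 1) : Int)
        = (((m + 2) + m + 1).choose (m + 1) : Int) - (((m + 2) + m + 1).choose m : Int)
    have e1 : (m + 2) + (m + 1) + 1 = (2 * m + 3) + 1 := by omega
    have e2 : (m + 2) + m + 1 = 2 * m + 3 := by omega
    rw [e1, e2]
    have hsym : ((2 * m + 3).choose (m + 2) : Int) = ((2 * m + 3).choose (m + 1) : Int) := by
      have := Nat.choose_symm (n := 2 * m + 3) (k := m + 2) (by omega)
      have h3 : 2 * m + 3 - (m + 2) = m + 1 := by omega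
      rw [h3] at this
      exact_mod_cast this.symm
    linear_combination pascalZ (2 * m + 3) (m + 1) - pascalZ (2 * m + 3) m + hsym

-- ===== B-side fold characterisation =====
theorem bfold (N : Nat) (j : Nat) (hj : j ≤ N) :
    (PySem.List.pyRange 1 ((j : Int) + 1) 1).foldl (bStep (N : Int)) ([1], 1)
      = ((List.range (j + 1)).map (fun k => catT N k), catT N j) := by
  induction j with
  | zero =>
    rw [PySem.List.pyRange_one_eq_nil (by norm_num)]
    simp [catT]
  | succ j ih =>
    have hle : (1 : Int) ≤ (j : Int) + 1 := by omega
    have hrw : ((j + 1 : Nat) : Int) + 1 = ((j : Int) + 1) + 1 := by push_cast; ring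
    rw [hrw, PySem.List.pyRange_one_succ_right hle, List.foldl_append, ih (by omega)]
    simp only [List.foldl_cons, List.foldl_nil, bStep]
    have hjN : (j : Int) < (N : Int) := by exact_mod_cast hj
    have hd : (0 : Int) < (((j : Int) + 1) * ((N : Int) + 2 - ((j : Int) + 1))) := by
      have h1 : (0 : Int) < (j : Int) + 1 := by positivity
      have h2 : (0 : Int) < (N : Int) + 2 - ((j : Int) + 1) := by omega
      exact mul_pos h1 h2
    have hnum : catT N j * ((N : Int) + ((j : Int) + 1)) * ((N : Int) + 1 - ((j : Int) + 1))
        = catT N (j + 1) * (((j : Int) + 1) * ((N : Int) + 2 - ((j : Int) + 1))) := by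
      linear_combination -(keyK N j)
    have ht : PySem.Int.floordiv (catT N j * ((N : Int) + ((j : Int) + 1)) * ((N : Int) + 1 - ((j : Int) + 1)))
        (((j : Int) + 1) * ((N : Int) + 2 - ((j : Int) + 1))) = catT N (j + 1) := by
      rw [hnum, PySem.Int.floordiv_eq_ediv_of_pos hd]
      exact Int.mul_ediv_cancel _ (ne_of_gt hd)
    rw [ht]
    simp [List.range_succ]

-- ===== A-side fold characterisation =====
theorem afold (N : Nat) (j : Nat) (hj : j ≤ N + 2) :
    (PySem.List.pyRange 0 (j : Int) 1).foldl (aStep ((List.range (N + 1)).map (fun k => catT N k))) ([], 0)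
      = ((List.range j).map (fun k => catT (N + 1) k), ∑ i ∈ Finset.range (min j (N + 1)), catT N i) := by
  induction j with
  | zero =>
    rw [show ((0 : Nat) : Int) = 0 by norm_num, PySem.List.pyRange_one_eq_nil (by norm_num)]
    simp
  | succ j ih =>
    have hrw : ((j + 1 : Nat) : Int) = (j : Int) + 1 := by push_cast; ring
    have h0j : (0 : Int) ≤ (j : Int) := by positivity
    rw [hrw, PySem.List.pyRange_one_succ_right h0j, List.foldl_append, ih (by omega)]
    simp only [List.foldl_cons, List.foldl_nil, aStep, PySem.List.len_eq]
    have hlen : (((List.range (N + 1)).map (fun k => catT N k)).length : Int) = (N : Int) + 1 := by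
      simp
    rw [hlen]
    by_cases hc : j ≤ N
    · have hcond : ((N : Int) + 1 > (j : Int)) := by
        have : (j : Int) ≤ (N : Int) := by exact_mod_cast hc
        omega
      rw [if_pos hcond]
      have hget : PySem.List.pyGetD ((List.range (N + 1)).map (fun k => catT N k)) (j : Int) 0 = catT N j := by
        rw [PySem.List.pyGetD_natCast]
        simp [List.getD_eq_getElem?_getD, Nat.lt_succ_of_le hc]
      rw [hget]
      have hmin1 : min j (N + 1) = j := by omega
      have hmin2 : min (j + 1) (N + 1) = j + 1 := by omega
      rw [hmin1, hmin2, Finset.sum_range_succ]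
      have hentry : (∑ i ∈ Finset.range j, catT N i) + catT N j = catT (N + 1) j := by
        rw [← Finset.sum_range_succ]; exact Ssum N j
      rw [hentry]
      simp [List.range_succ]
    · have hj' : j = N + 1 := by omega
      have hcond : ¬ ((N : Int) + 1 > (j : Int)) := by
        subst hj'; push_cast; omega
      rw [if_neg hcond]
      have hmin1 : min j (N + 1) = N + 1 := by omega
      have hmin2 : min (j + 1) (N + 1) = N + 1 := by omega
      rw [hmin1, hmin2]
      have hentry : (∑ i ∈ Finset.range (N + 1), catT N i) = catT (N + 1) j := by
        rw [Ssum N N, hj', topT]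
      rw [hentry]
      simp [List.range_succ]

theorem genA (N : Nat) : generate_layer ((N : Int) + 1) = (List.range (N + 1)).map (fun k => catT N k) := by
  induction N with
  | zero =>
    rw [generate_layer]
    norm_num [catT]
  | succ N ih =>
    rw [generate_layer]
    rw [if_neg (by push_cast; omega)]
    have hprev : ((N + 1 : Nat) : Int) + 1 - 1 = (N : Int) + 1 := by push_cast; ring
    rw [hprev, ih]
    have hcast : ((N + 1 : Nat) : Int) + 1 = ((N + 2 : Nat) : Int) := by push_cast; ring
    rw [hcast]
    show ((PySem.List.pyRange 0 ((N + 2 : Nat) : Int) 1).foldl (aStep ((List.range (N + 1)).map (fun k => catT N k))) ([], 0)).1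
        = List.map (fun k => catT (N + 1) k) (List.range (N + 1 + 1))
    rw [afold N (N + 2) (by omega)]

theorem genB (N : Nat) (hN : 1 ≤ N) : generate_layer_alt ((N : Int) + 1) = (List.range (N + 1)).map (fun k => catT N k) := by
  rw [generate_layer_alt]
  rw [if_neg (by omega)]
  have h1 : ((N : Int) + 1 - 1) + 1 = (N : Int) + 1 := by ring
  have h2 : ((N : Int) + 1 - 1) = (N : Int) := by ring
  simp only [h2]
  rw [bfold N N (by omega)]

-- ===== VERDICT (by name: the statement is the Claim_ definition above) =====
theorem generate_layer_spec : Claim_equal_generate_layer := by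
  intro L _ _
  unfold Spec_generate_layer
  by_cases h : L ≤ 1
  · rw [generate_layer, generate_layer_alt]; simp [h]
  · have hN : ((L - 1).toNat : Int) = L - 1 := by omega
    have h1 : 1 ≤ (L - 1).toNat := by omega
    have hL : L = (((L - 1).toNat : Int)) + 1 := by omega
    rw [hL, genA, genB _ h1]
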